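-- pv_equiv track=rewrite | github.com/sjq0098/news-mosaic | backend-0717-2/services/news_service.py | _parse_string_results
-- ===== SOURCE A (Python) =====
-- from typing import List, Dict, Any, Optional, Tuple
--
-- def _parse_string_results(results: str) -> List[Dict[str, Any]]:
--     """解析字符串格式的结果"""
--     articles = []
--     lines = results.split('\n')
--     current_article = {}
--
--     for line in lines:
--         line = line.strip()
--         if not line:
--             if current_article:
--                 articles.append(current_article)
--                 current_article = {}
--             continue
--
--         if line.startswith('Title:'):
--             current_article['title'] = line.replace('Title:', '').strip()
--         elif line.startswith('Link:'):
--             current_article['url'] = line.replace('Link:', '').strip()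
--         elif line.startswith('Source:'):
--             current_article['source'] = line.replace('Source:', '').strip()
--         elif line.startswith('Date:'):
--             current_article['date'] = line.replace('Date:', '').strip()
--         elif line.startswith('Snippet:'):
--             current_article['snippet'] = line.replace('Snippet:', '').strip()
--
--     if current_article:
--         articles.append(current_article)
--
--     return articles
-- ===== SOURCE B (Python) =====
-- _FIELDS = (('Title:', 'title'), ('Link:', 'url'), ('Source:', 'source'),
--            ('Date:', 'date'), ('Snippet:', 'snippet'))
--
--
-- def _parse_string_results(results: str):
--     """Two-pass: split into blocks of non-blank lines, then parse each block."""
--     stripped = [ln.strip() for ln in results.split('\n')]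
--
--     # pass 1: maximal runs of non-blank lines
--     blocks = []
--     cur = []
--     for ln in stripped:
--         if ln:
--             cur.append(ln)
--         elif cur:
--             blocks.append(cur)
--             cur = []
--     if cur:
--         blocks.append(cur)
--
--     # pass 2: each block -> dict (last occurrence of a field wins)
--     articles = []
--     for block in blocks:
--         art = {}
--         for ln in block:
--             for prefix, key in _FIELDS:
--                 if ln.startswith(prefix):
--                     art[key] = ln.replace(prefix, '').strip()
--                     break
--         if art:
--             articles.append(art)
--     return articles
-- ===== Notes on version B (the rewrite author's own statement) =====
-- stated objective: alternative
-- what changed: Replaced the single flush-on-blank loop carrying a mutable current-article dict by a two-pass structure: first partition the stripped lines into maximal blocks of non-blank lines, then parse each block independently via a prefix->key table, keeping only non-empty dicts.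
import Mathlib
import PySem

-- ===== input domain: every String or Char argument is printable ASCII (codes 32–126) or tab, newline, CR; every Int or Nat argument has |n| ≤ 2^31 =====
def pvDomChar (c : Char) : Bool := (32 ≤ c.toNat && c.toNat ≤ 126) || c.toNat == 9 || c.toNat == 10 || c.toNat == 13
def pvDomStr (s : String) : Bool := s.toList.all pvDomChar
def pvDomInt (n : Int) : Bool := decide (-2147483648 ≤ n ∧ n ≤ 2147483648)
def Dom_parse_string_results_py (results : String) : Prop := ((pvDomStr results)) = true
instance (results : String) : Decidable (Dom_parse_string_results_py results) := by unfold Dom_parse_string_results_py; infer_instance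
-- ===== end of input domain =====

-- B replaces A's single flush-on-blank loop by a two-pass structure (blocks of
-- non-blank lines, then per-block parsing via a prefix table); same result, same cost.

-- ===== PORT A =====
-- the elif chain of A's loop body, on the already-stripped non-blank line
def pvALine (d : PySem.Dict String String) (line : String) : PySem.Dict String String :=
  if PySem.Str.startswith line "Title:" then
    d.insert "title" (PySem.Str.strip (PySem.Str.replace line "Title:" ""))
  else if PySem.Str.startswith line "Link:" then
    d.insert "url" (PySem.Str.strip (PySem.Str.replace line "Link:" ""))
  else if PySem.Str.startswith line "Source:" then
    d.insert "source" (PySem.Str.strip (PySem.Str.replace line "Source:" ""))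
  else if PySem.Str.startswith line "Date:" then
    d.insert "date" (PySem.Str.strip (PySem.Str.replace line "Date:" ""))
  else if PySem.Str.startswith line "Snippet:" then
    d.insert "snippet" (PySem.Str.strip (PySem.Str.replace line "Snippet:" ""))
  else d

-- A's loop body after `line = line.strip()`; state = (articles, current_article)
def pvAStep' (st : List (PySem.Dict String String) × PySem.Dict String String)
    (line : String) : List (PySem.Dict String String) × PySem.Dict String String :=
  if line = "" then
    (if st.2.items = [] then st else (st.1 ++ [st.2], PySem.Dict.empty))
  else (st.1, pvALine st.2 line)

-- one iteration of A's for-loop: first `line = line.strip()`, then the body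
def pvAStep (st : List (PySem.Dict String String) × PySem.Dict String String)
    (rawline : String) : List (PySem.Dict String String) × PySem.Dict String String :=
  pvAStep' st (PySem.Str.strip rawline)

def parse_string_results_py (results : String) : List (List (String × String)) :=
  let lines := (PySem.Str.split? results "\n").getD []   -- sep ≠ "": never none
  let st := lines.foldl pvAStep ([], PySem.Dict.empty)
  let articles := if st.2.items = [] then st.1 else st.1 ++ [st.2]
  articles.map (·.items)

-- ===== PORT B =====
def pvTable : List (String × String) :=
  [("Title:", "title"), ("Link:", "url"), ("Source:", "source"),
   ("Date:", "date"), ("Snippet:", "snippet")]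

-- B's inner for-prefix loop with break = act on the first matching table entry
def pvBLine (d : PySem.Dict String String) (line : String) : PySem.Dict String String :=
  match pvTable.find? (fun p => PySem.Str.startswith line p.1) with
  | some (pre, key) => d.insert key (PySem.Str.strip (PySem.Str.replace line pre ""))
  | none => d

def pvParseBlock (b : List String) : PySem.Dict String String :=
  b.foldl pvBLine PySem.Dict.empty

-- pass-1 step: state = (blocks, cur)
def pvBlockStep (p : List (List String) × List String) (ln : String) :
    List (List String) × List String :=
  if ln ≠ "" then (p.1, p.2 ++ [ln])
  else if p.2 = [] then p
  else (p.1 ++ [p.2], [])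

def parse_string_results_py_alt (results : String) : List (List (String × String)) :=
  let stripped := ((PySem.Str.split? results "\n").getD []).map PySem.Str.strip
  let p := stripped.foldl pvBlockStep ([], [])
  let blocks := if p.2 = [] then p.1 else p.1 ++ [p.2]
  blocks.foldl
    (fun arts b =>
      let art := pvParseBlock b
      if art.items = [] then arts else arts ++ [art.items]) []

-- ===== PRECONDITION & SPEC =====
def Spec_parse_string_results_py (results : String) (out : List (List (String × String))) : Prop := out = parse_string_results_py_alt results
instance (results : String) (out : List (List (String × String))) : Decidable (Spec_parse_string_results_py results out) := by unfold Spec_parse_string_results_py; infer_instance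

-- ===== CLAIM (what is proved, stated in full; the proofs are below) =====
def Claim_equal_parse_string_results_py : Prop := ∀ (results : String), Dom_parse_string_results_py results → Spec_parse_string_results_py results (parse_string_results_py results)

-- ===== LEMMAS AND PROOFS =====

-- A's elif chain and B's table lookup assign the same field
lemma pvALine_eq_pvBLine : pvALine = pvBLine := by
  funext d line
  simp only [pvALine, pvBLine, pvTable, List.find?]
  split_ifs <;> simp_all

-- B's pass-2 accumulation, as a function of the block list
def pvProcess (bs : List (List String)) : List (List (String × String)) :=
  (bs.filter (fun b => !(pvParseBlock b).items.isEmpty)).map (fun b => (pvParseBlock b).items)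

lemma pvProcess_eq_foldl (bs : List (List String)) (acc : List (List (String × String))) :
    bs.foldl
      (fun arts b =>
        if (pvParseBlock b).items = [] then arts else arts ++ [(pvParseBlock b).items]) acc
    = acc ++ pvProcess bs := by
  induction bs generalizing acc with
  | nil => simp [pvProcess]
  | cons b bs ih =>
      simp only [List.foldl_cons]
      rw [ih]
      by_cases h : (pvParseBlock b).items = [] <;> simp [pvProcess, h]

-- accumulator shift for B's pass-1 fold
lemma pvBFold_shift (ls : List String) (bs : List (List String)) (cb : List String) :
    ls.foldl pvBlockStep (bs, cb)
    = (bs ++ (ls.foldl pvBlockStep ([], cb)).1, (ls.foldl pvBlockStep ([], cb)).2) := by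
  induction ls generalizing bs cb with
  | nil => simp
  | cons l ls ih =>
      simp only [List.foldl_cons, pvBlockStep]
      split
      · exact ih bs (cb ++ [l])
      · split
        · exact ih bs cb
        · rw [ih (bs ++ [cb]) [], ih ([] ++ [cb]) []]
          simp

lemma pvParseBlock_append (cb : List String) (l : String) :
    pvParseBlock (cb ++ [l]) = pvBLine (pvParseBlock cb) l := by
  simp [pvParseBlock]

def pvFinishB (p : List (List String) × List String) : List (List String) :=
  if p.2 = [] then p.1 else p.1 ++ [p.2]

lemma pvFinishB_shift (bs : List (List String)) (p : List (List String) × List String) :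
    pvFinishB (bs ++ p.1, p.2) = bs ++ pvFinishB p := by
  unfold pvFinishB; split <;> simp

lemma pvDict_items_nil {d : PySem.Dict String String} (h : d.items = []) :
    d = PySem.Dict.empty := by
  apply PySem.Dict.ext; simp [h, PySem.Dict.empty]

def pvFinishA (st : List (PySem.Dict String String) × PySem.Dict String String) :
    List (PySem.Dict String String) :=
  if st.2.items = [] then st.1 else st.1 ++ [st.2]

lemma h0c : pvParseBlock ([] : List String) = PySem.Dict.empty := rfl

-- the main invariant: A's loop continued from (arts, parse of the open block cb)
-- produces arts followed by the parses of B's remaining blocks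
lemma pvMain (ls : List String) (arts : List (PySem.Dict String String)) (cb : List String) :
    (pvFinishA (ls.foldl pvAStep' (arts, pvParseBlock cb))).map (·.items)
    = arts.map (·.items) ++ pvProcess (pvFinishB (ls.foldl pvBlockStep ([], cb))) := by
  have h0 : (pvParseBlock ([] : List String)).items = [] := rfl
  induction ls generalizing arts cb with
  | nil =>
      simp only [List.foldl_nil, pvFinishA, pvFinishB]
      by_cases hi : (pvParseBlock cb).items = []
      · by_cases hcb : cb = []
        · subst hcb; simp [h0, pvProcess]
        · rw [if_pos hi, if_neg hcb]
          simp [pvProcess, hi]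
      · have hcb : cb ≠ [] := by
          intro h; subst h; exact hi h0
        rw [if_neg hi, if_neg hcb]
        simp [pvProcess, hi]
  | cons l ls ih =>
      simp only [List.foldl_cons, pvAStep', pvBlockStep]
      by_cases hblank : l = ""
      · have hbn : ¬(l ≠ "") := by simp [hblank]
        rw [if_pos hblank, if_neg hbn]
        by_cases hcb : cb = []
        · subst hcb
          rw [if_pos h0, if_pos rfl]
          exact ih arts []
        · rw [if_neg hcb]
          by_cases hi : (pvParseBlock cb).items = []
          · rw [if_pos hi]
            have hpe : pvParseBlock cb = PySem.Dict.empty := pvDict_items_nil hi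
            have h := ih arts []
            rw [h0c] at h
            rw [← hpe] at h
            simp only [List.nil_append]
            rw [h, pvBFold_shift ls [cb] [], pvFinishB_shift [cb]]
            simp [pvProcess, hi]
          · rw [if_neg hi]
            have h := ih (arts ++ [pvParseBlock cb]) []
            rw [h0c] at h
            simp only [List.nil_append]
            rw [h, pvBFold_shift ls [cb] [], pvFinishB_shift [cb]]
            simp [pvProcess, hi]
      · rw [if_neg hblank, if_pos hblank]
        have hb : pvALine (pvParseBlock cb) l = pvParseBlock (cb ++ [l]) := by
          rw [pvParseBlock_append, pvALine_eq_pvBLine]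
        rw [hb]
        exact ih arts (cb ++ [l])

-- ===== VERDICT (by name: the statement is the Claim_ definition above) =====
theorem parse_string_results_py_spec : Claim_equal_parse_string_results_py := by
  intro results _
  unfold Spec_parse_string_results_py parse_string_results_py parse_string_results_py_alt
  dsimp only
  have hmap : ((PySem.Str.split? results "\n").getD []).foldl pvAStep ([], PySem.Dict.empty)
      = (((PySem.Str.split? results "\n").getD []).map PySem.Str.strip).foldl pvAStep'
          ([], PySem.Dict.empty) := by
    rw [List.foldl_map]; rfl
  rw [hmap]
  have h := pvMain (((PySem.Str.split? results "\n").getD []).map PySem.Str.strip) [] []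
  rw [h0c] at h
  rw [pvProcess_eq_foldl]
  simpa [pvFinishA, pvFinishB] using h
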